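-- pv_equiv track=rewrite | github.com/muskan64star/gfg-repo | Medium/Minimize the Difference/minimize-the-difference.py | minimizeDifference
-- ===== SOURCE A (Python) =====
-- from typing import List
--
-- def minimizeDifference(n : int, k : int, arr : List[int]) -> int:
--     # code here
--     if k==n-1:
--         return 0
--     rit_min=[0]*n
--     rit_max=[0]*n
--     left_min=[0]*n
--     left_max=[0]*n
--     left_min[0]=left_max[0]=arr[0]
--     for i in range(1,n):
--         left_min[i]=min(left_min[i-1],arr[i])
--         left_max[i]=max(left_max[i-1],arr[i])
--     rit_min[-1]=rit_max[-1]=arr[-1]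
--     for i in range(n-2,-1,-1):
--         rit_min[i]=min(rit_min[i+1],arr[i])
--         rit_max[i]=max(rit_max[i+1],arr[i])
--     ans=rit_max[k]-rit_min[k]
--     i=0
--     for j in range(k+1,n):
--         ans=min(ans,max(left_max[i],rit_max[j])-min(left_min[i],rit_min[j]))
--         i+=1
--     ans=min(ans,left_max[i]-left_min[i])
--     return ans
-- ===== SOURCE B (Python) =====
-- from typing import List
--
-- def minimizeDifference(n: int, k: int, arr: List[int]) -> int:
--     if k == n - 1:
--         return 0
--     ranges = []
--     for s in range(n - k + 1):
--         rest = [arr[i] for i in range(n) if i < s or i >= s + k]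
--         ranges.append(max(rest) - min(rest))
--     return min(ranges)
-- ===== Notes on version B (the rewrite author's own statement) =====
-- stated objective: simpler
-- what changed: Keeps only A's explicit k==n-1 shortcut; the four prefix/suffix min/max tables and the three index loops are replaced by a single loop over window starts that takes max-min of the elements outside the window and keeps the running minimum.
-- outside the precondition, e.g. on minimizeDifference(2, 0, [7, 3, 6, 8]): A returns 1, B returns 4
import Mathlib
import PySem

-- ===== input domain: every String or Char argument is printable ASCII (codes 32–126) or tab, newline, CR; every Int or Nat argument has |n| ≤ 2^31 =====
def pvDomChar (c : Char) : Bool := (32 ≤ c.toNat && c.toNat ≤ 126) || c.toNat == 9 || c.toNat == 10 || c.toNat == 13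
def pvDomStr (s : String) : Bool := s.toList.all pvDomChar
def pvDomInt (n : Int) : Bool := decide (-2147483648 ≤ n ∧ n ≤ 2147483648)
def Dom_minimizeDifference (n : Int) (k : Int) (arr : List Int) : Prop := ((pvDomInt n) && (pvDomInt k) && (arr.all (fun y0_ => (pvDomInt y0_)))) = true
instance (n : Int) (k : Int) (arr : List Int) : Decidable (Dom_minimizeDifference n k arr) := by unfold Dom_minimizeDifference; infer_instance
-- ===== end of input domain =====

-- B keeps A's explicit k==n-1 shortcut but replaces the four prefix/suffix min/max tables and
-- the three index loops by one loop over window starts that takes max-min of the elements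
-- outside the window directly and returns the minimum of those ranges.

-- ===== PORT A =====
-- Literal port of A. The Python fills rit_min/rit_max from the right; the port builds the same
-- lists by prepending, so at step i the accumulator's head IS rit_min[i+1] (what Python reads).
def minimizeDifference (n : Int) (k : Int) (arr : List Int) : Int :=
  if k = n - 1 then 0
  else
    let a0 := PySem.List.pyGetD arr 0 0
    let left := (PySem.List.pyRange 1 n 1).foldl
      (fun (p : List Int × List Int) i =>
        (p.1 ++ [min (PySem.List.pyGetD p.1 (i - 1) 0) (PySem.List.pyGetD arr i 0)],
         p.2 ++ [max (PySem.List.pyGetD p.2 (i - 1) 0) (PySem.List.pyGetD arr i 0)]))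
      ([a0], [a0])
    let aN := PySem.List.pyGetD arr (-1) 0
    let rit := (PySem.List.pyRange (n - 2) (-1) (-1)).foldl
      (fun (p : List Int × List Int) i =>
        (min (PySem.List.pyGetD p.1 0 0) (PySem.List.pyGetD arr i 0) :: p.1,
         max (PySem.List.pyGetD p.2 0 0) (PySem.List.pyGetD arr i 0) :: p.2))
      ([aN], [aN])
    let ans0 := PySem.List.pyGetD rit.2 k 0 - PySem.List.pyGetD rit.1 k 0
    let st := (PySem.List.pyRange (k + 1) n 1).foldl
      (fun (q : Int × Int) j =>
        (min q.1 (max (PySem.List.pyGetD left.2 q.2 0) (PySem.List.pyGetD rit.2 j 0)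
                  - min (PySem.List.pyGetD left.1 q.2 0) (PySem.List.pyGetD rit.1 j 0)),
         q.2 + 1))
      (ans0, 0)
    min st.1 (PySem.List.pyGetD left.2 st.2 0 - PySem.List.pyGetD left.1 st.2 0)

-- ===== PORT B =====
def minimizeDifference_alt (n : Int) (k : Int) (arr : List Int) : Int :=
  if k = n - 1 then 0
  else
    let ranges := (PySem.List.pyRange 0 (n - k + 1) 1).map (fun s =>
      let rest := ((PySem.List.pyRange 0 n 1).filter
          (fun i => decide (i < s) || decide (s + k ≤ i))).map
          (fun i => PySem.List.pyGetD arr i 0)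
      (PySem.List.max? rest (fun x => x)).getD 0 - (PySem.List.min? rest (fun x => x)).getD 0)
    (PySem.List.min? ranges (fun x => x)).getD 0

-- ===== PRECONDITION & SPEC =====
-- Pre_ admits the k = n-1 shortcut (both return 0) and the natural domain n = len(arr) ≥ 1 with
-- a window 0 ≤ k < n; it excludes the general path with n ≠ len(arr), where A mixes arr[-1] of
-- the full list into its length-n tables — an accident of the implementation.
def Pre_minimizeDifference (n : Int) (k : Int) (arr : List Int) : Prop :=
  k = n - 1 ∨ (n = arr.length ∧ 1 ≤ n ∧ 0 ≤ k ∧ k < n)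
instance (n : Int) (k : Int) (arr : List Int) : Decidable (Pre_minimizeDifference n k arr) := by
  unfold Pre_minimizeDifference; infer_instance
def pvWitness_minimizeDifference : Int × Int × List Int := (3, 1, [1, 5, 2])

def Spec_minimizeDifference (n : Int) (k : Int) (arr : List Int) (out : Int) : Prop := out = minimizeDifference_alt n k arr
instance (n : Int) (k : Int) (arr : List Int) (out : Int) : Decidable (Spec_minimizeDifference n k arr out) := by unfold Spec_minimizeDifference; infer_instance

-- ===== CLAIM (what is proved, stated in full; the proofs are below) =====
def Claim_equal_minimizeDifference : Prop := ∀ (n : Int) (k : Int) (arr : List Int), Dom_minimizeDifference n k arr → Pre_minimizeDifference n k arr → Spec_minimizeDifference n k arr (minimizeDifference n k arr)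

-- ===== LEMMAS AND PROOFS =====

-- fold value of a nonempty list (max/min of a Python sequence), 0 on []
def gfold (f : Int → Int → Int) : List Int → Int
  | [] => 0
  | x :: t => t.foldl f x

-- the remaining sequence after deleting the window of length kk starting at s
def restW (arr : List Int) (kk s : Nat) : List Int := arr.take s ++ arr.drop (s + kk)

-- range of the remaining sequence for window start s
def gW (arr : List Int) (kk s : Nat) : Int := gfold max (restW arr kk s) - gfold min (restW arr kk s)

-- prefix scan: pscan f acc l = [acc, f acc l0, f (f acc l0) l1, …]  (A's left tables)
def pscan (f : Int → Int → Int) (acc : Int) : List Int → List Int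
  | [] => [acc]
  | x :: l => acc :: pscan f (f acc x) l

-- suffix scan (A's rit tables): sscan f l [j] = suffix-combined value from j
def sscan (f : Int → Int → Int) : List Int → List Int
  | [] => []
  | [x] => [x]
  | x :: y :: t => f ((sscan f (y :: t)).headD 0) x :: sscan f (y :: t)

lemma foldl_left_comm (f : Int → Int → Int)
    (ha : ∀ a b c, f (f a b) c = f a (f b c)) :
    ∀ (t : List Int) (a b : Int), t.foldl f (f a b) = f a (t.foldl f b) := by
  intro t
  induction t with
  | nil => intro a b; rfl
  | cons c t ih =>
    intro a b
    simp only [List.foldl_cons]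
    rw [ha, ih]
lemma getD_pscan (f : Int → Int → Int) :
    ∀ (l : List Int) (acc : Int) (i : Nat), i ≤ l.length →
      (pscan f acc l).getD i 0 = (l.take i).foldl f acc := by
  intro l
  induction l with
  | nil =>
    intro acc i hi
    simp only [List.length_nil, Nat.le_zero] at hi
    subst hi; rfl
  | cons x l ih =>
    intro acc i hi
    cases i with
    | zero => rfl
    | succ j =>
      simp only [pscan, List.getD_cons_succ, List.take_succ_cons, List.foldl_cons]
      exact ih (f acc x) j (by simpa using hi)
lemma pscan_append (f : Int → Int → Int) :
    ∀ (l : List Int) (acc x : Int),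
      pscan f acc (l ++ [x]) = pscan f acc l ++ [f (l.foldl f acc) x] := by
  intro l
  induction l with
  | nil => intro acc x; rfl
  | cons y l ih =>
    intro acc x
    simp only [List.cons_append, pscan, List.foldl_cons, ih]
lemma sscan_drop (f : Int → Int → Int) :
    ∀ (l : List Int) (j : Nat), (sscan f l).drop j = sscan f (l.drop j) := by
  intro l
  induction l with
  | nil => intro j; simp [sscan]
  | cons x t ih =>
    intro j
    cases j with
    | zero => rfl
    | succ j' =>
      cases t with
      | nil => simp [sscan]
      | cons y t' =>
        show (sscan f (x :: y :: t')).drop (j' + 1) = _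
        simp only [sscan, List.drop_succ_cons]
        exact ih j'
lemma headD_sscan (f : Int → Int → Int)
    (hc : ∀ a b, f a b = f b a) (ha : ∀ a b c, f (f a b) c = f a (f b c)) :
    ∀ (l : List Int), l ≠ [] → (sscan f l).headD 0 = gfold f l := by
  intro l
  induction l with
  | nil => intro h; exact absurd rfl h
  | cons x t ih =>
    intro _
    cases t with
    | nil => rfl
    | cons y t' =>
      simp only [sscan, List.headD_cons, gfold, List.foldl_cons]
      rw [ih (by simp)]
      simp only [gfold]
      rw [hc, ← foldl_left_comm f ha]
-- A's left-table loop builds exactly the prefix scan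
lemma length_pscan (f : Int → Int → Int) :
    ∀ (l : List Int) (acc : Int), (pscan f acc l).length = l.length + 1 := by
  intro l
  induction l with
  | nil => intro acc; rfl
  | cons x l ih => intro acc; simp [pscan, ih]

-- A's left-table loop builds exactly the prefix scan
lemma left_fold_eq (f : Int → Int → Int) (a : Int) (t : List Int) :
    ∀ m : Nat, m ≤ t.length →
      (PySem.List.pyRange 1 (1 + (m : Int)) 1).foldl
        (fun acc i => acc ++ [f (PySem.List.pyGetD acc (i - 1) 0) (PySem.List.pyGetD (a :: t) i 0)])
        [a] = pscan f a (t.take m) := by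
  intro m
  induction m with
  | zero => intro _; simp [PySem.List.pyRange_one_eq_nil, pscan]
  | succ m ih =>
    intro hm
    have hm' : m ≤ t.length := Nat.le_of_succ_le hm
    have hsplit : (1 : Int) + ((m : Int) + 1) = (1 + (m : Int)) + 1 := by ring
    rw [show ((m + 1 : Nat) : Int) = (m : Int) + 1 by omega, hsplit,
        PySem.List.pyRange_one_succ_right (by omega), List.foldl_append, ih hm']
    simp only [List.foldl_cons, List.foldl_nil]
    have hlen : (pscan f a (t.take m)).length = m + 1 := by
      rw [length_pscan, List.length_take_of_le hm']
    have hget1 : PySem.List.pyGetD (pscan f a (t.take m)) ((1 : Int) + (m : Int) - 1) 0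
        = (t.take m).foldl f a := by
      rw [show (1 : Int) + (m : Int) - 1 = ((m : Nat) : Int) by omega,
          PySem.List.pyGetD_natCast, getD_pscan f _ _ m (by simp [List.length_take_of_le hm']),
          List.take_take]
      simp
    have hget2 : PySem.List.pyGetD (a :: t) ((1 : Int) + (m : Int)) 0 = t[m] := by
      rw [show (1 : Int) + (m : Int) = (((m + 1 : Nat)) : Int) by push_cast; ring,
          PySem.List.pyGetD_natCast]
      simp only [List.getD, List.getElem?_cons_succ,
        List.getElem?_eq_getElem (by omega : m < t.length), Option.getD_some]
      rfl
    have htake : t.take (m + 1) = t.take m ++ [t[m]] := by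
      rw [List.take_add_one, List.getElem?_eq_getElem (by omega : m < t.length)]; rfl
    rw [hget1, hget2, ← pscan_append, ← htake]
-- A's rit-table loop builds exactly the suffix scan
lemma right_fold_eq (f : Int → Int → Int) (arr : List Int) :
    ∀ j : Nat, j ≤ arr.length - 1 →
      (PySem.List.pyRange ((j : Int) - 1) (-1) (-1)).foldl
        (fun acc i => f (PySem.List.pyGetD acc 0 0) (PySem.List.pyGetD arr i 0) :: acc)
        (sscan f (arr.drop j)) = sscan f arr := by
  intro j
  induction j with
  | zero =>
    intro _
    rw [PySem.List.pyRange_neg_one_eq_nil (by omega)]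
    rfl
  | succ j ih =>
    intro hj
    have hj' : j ≤ arr.length - 1 := Nat.le_of_succ_le hj
    have hjlt : j + 1 < arr.length := by omega
    rw [show ((j + 1 : Nat) : Int) - 1 = (j : Int) by push_cast; ring,
        PySem.List.pyRange_neg_one_cons (by omega)]
    simp only [List.foldl_cons]
    have hstep : (f (PySem.List.pyGetD (sscan f (arr.drop (j + 1))) 0 0)
        (PySem.List.pyGetD arr (j : Int) 0) :: sscan f (arr.drop (j + 1)))
        = sscan f (arr.drop j) := by
      have hdrop : arr.drop j = arr[j] :: arr.drop (j + 1) := by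
        rw [List.drop_eq_getElem_cons (by omega)]
      have hd1 : arr.drop (j + 1) ≠ [] := by
        simp only [ne_eq, List.drop_eq_nil_iff]
        omega
      obtain ⟨y, t', hyt⟩ := List.exists_cons_of_ne_nil hd1
      obtain ⟨h, s, hs⟩ : ∃ h s, sscan f (y :: t') = h :: s := by
        cases t' <;> exact ⟨_, _, rfl⟩
      rw [hdrop, hyt]
      simp only [sscan, hs, PySem.List.pyGetD_zero_cons, List.headD_cons]
      congr 2
      rw [PySem.List.pyGetD_natCast]
      simp [List.getD, List.getElem?_eq_getElem (by omega : j < arr.length)]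
    rw [hstep]
    exact ih hj'
-- A's third loop as a fold of min over the window values
lemma loop_fold_eq (T : Int → Int → Int) :
    ∀ (m : Nat) (a acc i0 : Int),
      (PySem.List.pyRange a (a + (m : Int)) 1).foldl
        (fun (q : Int × Int) j => (min q.1 (T j q.2), q.2 + 1)) (acc, i0)
      = ((List.range m).foldl (fun ac (c : Nat) => min ac (T (a + (c : Int)) (i0 + (c : Int)))) acc,
         i0 + (m : Int)) := by
  intro m
  induction m with
  | zero => intro a acc i0; rw [PySem.List.pyRange_one_eq_nil (by omega)]; simp
  | succ m ih =>
    intro a acc i0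
    rw [PySem.List.pyRange_one_cons (by omega)]
    simp only [List.foldl_cons]
    rw [show a + ((m + 1 : Nat) : Int) = (a + 1) + (m : Int) by push_cast; ring,
        ih (a + 1) (min acc (T a i0)) (i0 + 1)]
    rw [List.range_succ_eq_map, List.foldl_cons, List.foldl_map]
    refine Prod.ext ?_ (by push_cast; ring)
    simp only [Nat.cast_zero, add_zero]
    apply PySem.List.foldl_congr_mem
    intro ac c _
    have h1 : a + 1 + (c : Int) = a + ((Nat.succ c : Nat) : Int) := by push_cast; ring
    have h2 : i0 + 1 + (c : Int) = i0 + ((Nat.succ c : Nat) : Int) := by push_cast; ring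
    rw [h1, h2]
lemma gfold_parts (f : Int → Int → Int) (ha : ∀ a b c, f (f a b) c = f a (f b c))
    (a : Int) (l d : List Int) (hd : d ≠ []) :
    gfold f (a :: (l ++ d)) = f (l.foldl f a) (gfold f d) := by
  obtain ⟨x, d', rfl⟩ := List.exists_cons_of_ne_nil hd
  show (l ++ x :: d').foldl f a = _
  rw [List.foldl_append, List.foldl_cons, foldl_left_comm f ha]
  rfl

lemma getD_sscan (f : Int → Int → Int)
    (hc : ∀ a b, f a b = f b a) (ha : ∀ a b c, f (f a b) c = f a (f b c))
    (arr : List Int) (j : Nat) (hj : j < arr.length) :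
    (sscan f arr).getD j 0 = gfold f (arr.drop j) := by
  have h1 : (sscan f arr).getD j 0 = ((sscan f arr).drop j).headD 0 := by
    simp [List.getD, List.headD_eq_head?_getD, List.head?_drop]
  rw [h1, sscan_drop, headD_sscan f hc ha _ (by simp only [ne_eq, List.drop_eq_nil_iff]; omega)]

lemma restW_ne_nil (arr : List Int) (K s : Nat)
    (hK : K < arr.length) : restW arr K s ≠ [] := by
  intro h
  have := congrArg List.length h
  simp only [restW, List.length_append, List.length_take, List.length_drop,
    List.length_nil] at this
  omega

lemma max_getD (l : List Int) (hl : l ≠ []) :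
    (PySem.List.max? l (fun x => x)).getD 0 = gfold max l := by
  obtain ⟨x, t, rfl⟩ := List.exists_cons_of_ne_nil hl
  rw [PySem.List.max?_id_cons]
  rfl

lemma min_getD (l : List Int) (hl : l ≠ []) :
    (PySem.List.min? l (fun x => x)).getD 0 = gfold min l := by
  obtain ⟨x, t, rfl⟩ := List.exists_cons_of_ne_nil hl
  rw [PySem.List.min?_id_cons]
  rfl

-- both sides equal this common form
lemma A_eq_common (k : Int) (arr : List Int) (h1 : 1 ≤ (arr.length : Int))
    (h2 : 0 ≤ k) (h3 : k < arr.length) (hne : k ≠ (arr.length : Int) - 1) :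
    minimizeDifference (arr.length) k arr
      = (List.range (arr.length - k.toNat)).foldl
          (fun ac c => min ac (gW arr k.toNat (c + 1))) (gW arr k.toNat 0) := by
  have hk : k = (k.toNat : Int) := (Int.toNat_of_nonneg h2).symm
  set K := k.toNat with hKdef
  cases arr with
  | nil => simp at h1
  | cons a t =>
    set N := (a :: t).length with hNdef
    have hKN : K < N := by simp only [hNdef]; omega
    have hKN2 : K ≤ N - 2 := by
      have : K ≠ N - 1 := by
        intro h
        exact hne (by rw [hk, h]; omega)
      omega
    have hN2 : 2 ≤ N := by omega
    simp only [minimizeDifference, if_neg hne]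
    have hlen : ((N : Nat) : Int) = 1 + (t.length : Int) := by
      simp only [hNdef, List.length_cons]; push_cast; ring
    have hleft : (PySem.List.pyRange 1 ((N : Nat) : Int) 1).foldl
        (fun (p : List Int × List Int) i =>
          (p.1 ++ [min (PySem.List.pyGetD p.1 (i - 1) 0) (PySem.List.pyGetD (a :: t) i 0)],
           p.2 ++ [max (PySem.List.pyGetD p.2 (i - 1) 0) (PySem.List.pyGetD (a :: t) i 0)]))
        ([PySem.List.pyGetD (a :: t) 0 0], [PySem.List.pyGetD (a :: t) 0 0])
        = (pscan min a t, pscan max a t) := by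
      rw [PySem.List.pyGetD_zero_cons,
          PySem.List.foldl_prod_mk
            (f := fun acc i => acc ++ [min (PySem.List.pyGetD acc (i - 1) 0) (PySem.List.pyGetD (a :: t) i 0)])
            (g := fun acc i => acc ++ [max (PySem.List.pyGetD acc (i - 1) 0) (PySem.List.pyGetD (a :: t) i 0)]),
          hlen, left_fold_eq min a t t.length le_rfl, left_fold_eq max a t t.length le_rfl,
          List.take_length]
    have hd : (a :: t).drop (N - 1) = [(a :: t).getLast (List.cons_ne_nil a t)] :=
      List.drop_length_sub_one (List.cons_ne_nil a t)
    have hNm : ((N : Nat) : Int) - 2 = ((N - 1 : Nat) : Int) - 1 := by omega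
    have hrit : (PySem.List.pyRange (((N : Nat) : Int) - 2) (-1) (-1)).foldl
        (fun (p : List Int × List Int) i =>
          (min (PySem.List.pyGetD p.1 0 0) (PySem.List.pyGetD (a :: t) i 0) :: p.1,
           max (PySem.List.pyGetD p.2 0 0) (PySem.List.pyGetD (a :: t) i 0) :: p.2))
        ([PySem.List.pyGetD (a :: t) (-1) 0], [PySem.List.pyGetD (a :: t) (-1) 0])
        = (sscan min (a :: t), sscan max (a :: t)) := by
      rw [PySem.List.pyGetD_neg_one (a :: t) 0 (List.cons_ne_nil a t),
          PySem.List.foldl_prod_mk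
            (f := fun acc i => min (PySem.List.pyGetD acc 0 0) (PySem.List.pyGetD (a :: t) i 0) :: acc)
            (g := fun acc i => max (PySem.List.pyGetD acc 0 0) (PySem.List.pyGetD (a :: t) i 0) :: acc),
          hNm]
      have e1 := right_fold_eq min (a :: t) (N - 1) (by omega)
      have e2 := right_fold_eq max (a :: t) (N - 1) (by omega)
      rw [hd] at e1 e2
      simp only [sscan] at e1 e2
      rw [e1, e2]
    rw [hleft, hrit]
    dsimp only
    have hans : PySem.List.pyGetD (sscan max (a :: t)) k 0
        - PySem.List.pyGetD (sscan min (a :: t)) k 0 = gW (a :: t) K 0 := by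
      rw [hk, PySem.List.pyGetD_natCast, PySem.List.pyGetD_natCast,
          getD_sscan max (fun x y => max_comm x y) (fun x y z => max_assoc x y z) _ K hKN,
          getD_sscan min (fun x y => min_comm x y) (fun x y z => min_assoc x y z) _ K hKN]
      simp [gW, restW]
    have hNr : ((N : Nat) : Int) = (k + 1) + ((N - K - 1 : Nat) : Int) := by omega
    rw [hans, hNr, loop_fold_eq
        (T := fun j i =>
          max (PySem.List.pyGetD (pscan max a t) i 0) (PySem.List.pyGetD (sscan max (a :: t)) j 0)
          - min (PySem.List.pyGetD (pscan min a t) i 0) (PySem.List.pyGetD (sscan min (a :: t)) j 0))]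
    dsimp only
    have hpre : ∀ (f : Int → Int → Int) (c : Nat), c ≤ t.length →
        PySem.List.pyGetD (pscan f a t) ((c : Nat) : Int) 0 = (t.take c).foldl f a := by
      intro f c hcle
      rw [PySem.List.pyGetD_natCast, getD_pscan f t a c hcle]
    have htlen : t.length = N - 1 := by simp [hNdef]
    have hsuf : ∀ (f : Int → Int → Int), (∀ x y, f x y = f y x) →
        (∀ x y z, f (f x y) z = f x (f y z)) → ∀ (j : Nat), j < N →
        PySem.List.pyGetD (sscan f (a :: t)) ((j : Nat) : Int) 0
          = gfold f ((a :: t).drop j) := by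
      intro f hc hassoc j hj
      rw [PySem.List.pyGetD_natCast, getD_sscan f hc hassoc _ j (by omega)]
    have hgw : ∀ c : Nat, c < N - K - 1 →
        gW (a :: t) K (c + 1)
          = max ((t.take c).foldl max a) (gfold max ((a :: t).drop (K + 1 + c)))
            - min ((t.take c).foldl min a) (gfold min ((a :: t).drop (K + 1 + c))) := by
      intro c hc
      have hrw : restW (a :: t) K (c + 1)
          = a :: (t.take c ++ (a :: t).drop (K + 1 + c)) := by
        simp only [restW, List.take_succ_cons, show (c + 1) + K = K + 1 + c by omega,
          List.cons_append]
      have hdne : (a :: t).drop (K + 1 + c) ≠ [] := by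
        simp only [ne_eq, List.drop_eq_nil_iff]
        omega
      rw [gW, hrw,
          gfold_parts max (fun x y z => max_assoc x y z) a _ _ hdne,
          gfold_parts min (fun x y z => min_assoc x y z) a _ _ hdne]
    rw [PySem.List.foldl_congr_mem _ _
        (fun ac c => min ac (gW (a :: t) K (c + 1))) _
        (by
          intro ac c hcmem
          have hc : c < N - K - 1 := List.mem_range.mp hcmem
          simp only [zero_add]
          rw [hpre max c (by omega), hpre min c (by omega),
              show k + 1 + (c : Int) = ((K + 1 + c : Nat) : Int) by omega,
              hsuf max (fun x y => max_comm x y) (fun x y z => max_assoc x y z) (K + 1 + c) (by omega),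
              hsuf min (fun x y => min_comm x y) (fun x y z => min_assoc x y z) (K + 1 + c) (by omega),
              hgw c hc])]
    have hfin : PySem.List.pyGetD (pscan max a t) (0 + ((N - K - 1 : Nat) : Int)) 0
        - PySem.List.pyGetD (pscan min a t) (0 + ((N - K - 1 : Nat) : Int)) 0
          = gW (a :: t) K (N - K) := by
      simp only [zero_add]
      rw [hpre max (N - K - 1) (by omega), hpre min (N - K - 1) (by omega)]
      have hrw : restW (a :: t) K (N - K) = a :: t.take (N - K - 1) := by
        have hdropN : (a :: t).drop ((N - K) + K) = [] :=
          List.drop_eq_nil_of_le (by simp only [List.length_cons]; omega)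
        have htake : (a :: t).take (N - K) = a :: t.take (N - K - 1) := by
          set M1 := N - K - 1 with hM1
          rw [show N - K = M1 + 1 by omega, List.take_succ_cons]
        simp only [restW]
        rw [hdropN, List.append_nil, htake]
      rw [gW, hrw]
      rfl
    rw [hfin]
    conv_rhs => rw [show N - K = (N - K - 1) + 1 by omega, List.range_succ]
    rw [List.foldl_append, List.foldl_cons, List.foldl_nil,
        show (N - K - 1) + 1 = N - K by omega]

lemma range_map_getD_take (arr : List Int) :
    ∀ m : Nat, m ≤ arr.length → (List.range m).map (fun c => arr.getD c 0) = arr.take m := by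
  intro m
  induction m with
  | zero => intro _; simp
  | succ m ih =>
    intro h
    rw [List.range_succ, List.map_append, ih (by omega), List.take_add_one,
        List.getElem?_eq_getElem (by omega : m < arr.length)]
    simp [List.getD, List.getElem?_eq_getElem (by omega : m < arr.length)]

lemma comp_eq_restW (k : Int) (arr : List Int) (K : Nat) (hk : k = (K : Int))
    (hK : K < arr.length) (sn : Nat) (hsn : sn ≤ arr.length - K) :
    ((PySem.List.pyRange 0 ((arr.length : Nat) : Int) 1).filter
        (fun i => decide (i < ((sn : Nat) : Int)) || decide (((sn : Nat) : Int) + k ≤ i))).map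
        (fun i => PySem.List.pyGetD arr i 0) = restW arr K sn := by
  rw [PySem.List.pyRange_one_append 0 ((sn : Nat) : Int) ((arr.length : Nat) : Int)
        (by omega) (by omega),
      PySem.List.pyRange_one_append ((sn : Nat) : Int) (((sn + K : Nat)) : Int)
        ((arr.length : Nat) : Int) (by push_cast; omega) (by push_cast; omega),
      List.filter_append, List.filter_append]
  rw [List.filter_eq_self.mpr (by
        intro x hx
        have hb := PySem.List.mem_pyRange_one.mp hx
        simp only [Bool.or_eq_true, decide_eq_true_eq]
        omega),
      List.filter_eq_nil_iff.mpr (by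
        intro x hx
        have hb := PySem.List.mem_pyRange_one.mp hx
        push_cast at hb
        simp only [Bool.or_eq_true, decide_eq_true_eq]
        omega),
      List.filter_eq_self.mpr (by
        intro x hx
        have hb := PySem.List.mem_pyRange_one.mp hx
        push_cast at hb
        simp only [Bool.or_eq_true, decide_eq_true_eq]
        omega),
      List.nil_append, List.map_append]
  have hfirst : (PySem.List.pyRange 0 ((sn : Nat) : Int) 1).map
      (fun i => PySem.List.pyGetD arr i 0) = arr.take sn := by
    rw [PySem.List.pyRange_one, List.map_map]
    simp only [sub_zero, Int.toNat_natCast]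
    rw [List.map_congr_left (fun c _ => by
      show PySem.List.pyGetD arr (0 + (c : Int)) 0 = arr.getD c 0
      rw [zero_add, PySem.List.pyGetD_natCast])]
    exact range_map_getD_take arr sn (by omega)
  have hlast : (PySem.List.pyRange (((sn + K : Nat)) : Int) ((arr.length : Nat) : Int) 1).map
      (fun i => PySem.List.pyGetD arr i 0) = arr.drop (sn + K) := by
    rw [PySem.List.map_pyGetD_pyRange' arr 0 (by omega), Int.toNat_natCast]
  rw [hfirst, hlast]
  rfl

lemma B_eq_common (k : Int) (arr : List Int) (_h1 : 1 ≤ (arr.length : Int))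
    (h2 : 0 ≤ k) (h3 : k < arr.length) (hne : k ≠ (arr.length : Int) - 1) :
    minimizeDifference_alt (arr.length) k arr
      = (List.range (arr.length - k.toNat)).foldl
          (fun ac c => min ac (gW arr k.toNat (c + 1))) (gW arr k.toNat 0) := by
  have hk : k = (k.toNat : Int) := (Int.toNat_of_nonneg h2).symm
  set K := k.toNat with hKdef
  set N := arr.length with hNdef
  have hKN : K < N := by omega
  have hM : (N : Int) - k + 1 = ((N - K : Nat) : Int) + 1 := by omega
  simp only [minimizeDifference_alt, if_neg hne, hM]
  rw [show PySem.List.pyRange 0 (((N - K : Nat) : Int) + 1) 1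
        = 0 :: PySem.List.pyRange (0 + 1) (((N - K : Nat) : Int) + 1) 1
        from PySem.List.pyRange_one_cons (by omega),
      List.map_cons, PySem.List.min?_id_cons, Option.getD_some, List.foldl_map]
  have hval : ∀ sn : Nat, sn ≤ N - K →
      (PySem.List.max? (((PySem.List.pyRange 0 ((N : Nat) : Int) 1).filter
          (fun i => decide (i < ((sn : Nat) : Int)) || decide (((sn : Nat) : Int) + k ≤ i))).map
          (fun i => PySem.List.pyGetD arr i 0)) (fun x => x)).getD 0 -
      (PySem.List.min? (((PySem.List.pyRange 0 ((N : Nat) : Int) 1).filter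
          (fun i => decide (i < ((sn : Nat) : Int)) || decide (((sn : Nat) : Int) + k ≤ i))).map
          (fun i => PySem.List.pyGetD arr i 0)) (fun x => x)).getD 0
        = gW arr K sn := by
    intro sn hsn
    rw [comp_eq_restW k arr K hk hKN sn hsn,
        max_getD _ (restW_ne_nil arr K sn hKN), min_getD _ (restW_ne_nil arr K sn hKN)]
    rfl
  have h0 := hval 0 (by omega)
  simp only [Nat.cast_zero] at h0
  rw [h0, show ((N - K : Nat) : Int) + 1 = 1 + ((N - K : Nat) : Int) by ring,
      show (0 : Int) + 1 = 1 by ring,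
      PySem.List.pyRange_one 1 (1 + ((N - K : Nat) : Int)),
      show (1 + ((N - K : Nat) : Int) - 1) = ((N - K : Nat) : Int) by ring,
      Int.toNat_natCast, List.foldl_map]
  apply PySem.List.foldl_congr_mem
  intro ac c hc
  have h1 := hval (c + 1) (by
    have := List.mem_range.mp hc
    omega)
  push_cast at h1
  rw [add_comm (1 : Int) (c : Int), h1]

-- ===== VERDICT (by name: the statement is the Claim_ definition above) =====
theorem minimizeDifference_spec : Claim_equal_minimizeDifference := by
  intro n k arr _ hpre
  show minimizeDifference n k arr = minimizeDifference_alt n k arr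
  by_cases hk1 : k = n - 1
  · simp only [minimizeDifference, minimizeDifference_alt, if_pos hk1]
  · rcases hpre with h | ⟨hn, h1, h2, h3⟩
    · exact absurd h hk1
    · subst hn
      rw [A_eq_common k arr h1 h2 h3 hk1, B_eq_common k arr h1 h2 h3 hk1]
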